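-- pv_equiv track=rewrite | github.com/OuazzaniNizar/Python_for_data_science | Project 10 - TF-IDF implementation using MapReduce and PySpark/MRJob_Streaming_TFIDF.py | reducer2
-- ===== SOURCE A (Python) =====
-- def reducer2(docId,termeInfo):
-- 	total=0
-- 	n=[]
-- 	terme=[]
-- 	D=[]
-- 	for valeur in termeInfo:
-- 		total+=valeur[1]
-- 		n.append(valeur[1])
-- 		terme.append(valeur[0])
-- 		D.append(valeur[2])
-- 	N=[total]*len(terme)
--
-- 	for valeur in range(len(terme)):
-- 		yield (terme[valeur],docId,D[valeur]),(n[valeur],N[valeur])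
-- ===== SOURCE B (Python) =====
-- def reducer2(docId, termeInfo):
--     items = list(termeInfo)
--
--     def agg(seg):
--         # divide-and-conquer tree reduction over the segment:
--         # returns (sum of counts, list of (key, count) rows) for seg
--         if not seg:
--             return 0, []
--         if len(seg) == 1:
--             t, n, d = seg[0]
--             return n, [((t, docId, d), n)]
--         mid = len(seg) // 2
--         ls, lrows = agg(seg[:mid])
--         rs, rrows = agg(seg[mid:])
--         return ls + rs, lrows + rrows
--
--     total, rows = agg(items)
--     for key, n in rows:
--         yield key, (n, total)
-- ===== Notes on version B (the rewrite author's own statement) =====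
-- stated objective: alternative
-- what changed: Replaces A's linear parallel-list accumulation loop and index-based replay emit with a divide-and-conquer tree reduction that recursively halves the item list, combining (count-sum, row-list) pairs bottom-up, then attaches the grand total to each row.
import Mathlib
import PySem

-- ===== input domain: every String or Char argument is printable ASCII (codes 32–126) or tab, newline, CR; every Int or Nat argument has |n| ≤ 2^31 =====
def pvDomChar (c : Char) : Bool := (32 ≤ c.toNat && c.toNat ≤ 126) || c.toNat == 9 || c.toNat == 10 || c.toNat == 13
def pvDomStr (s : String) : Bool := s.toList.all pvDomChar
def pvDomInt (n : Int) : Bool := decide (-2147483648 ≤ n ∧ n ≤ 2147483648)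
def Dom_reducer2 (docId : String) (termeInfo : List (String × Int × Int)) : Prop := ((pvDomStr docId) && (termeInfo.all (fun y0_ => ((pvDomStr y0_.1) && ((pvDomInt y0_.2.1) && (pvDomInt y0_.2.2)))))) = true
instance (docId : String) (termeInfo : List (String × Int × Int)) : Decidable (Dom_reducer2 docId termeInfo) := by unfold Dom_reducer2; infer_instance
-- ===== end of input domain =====

-- B replaces A's linear parallel-list accumulation + index-replay emit with a
-- divide-and-conquer tree reduction over the item list (objective: alternative).
-- Both versions are Python generators; we port the full sequence of yielded pairs as a list.


-- ===== PORT A =====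
-- range(len(terme)) is ported as List.range (exact: len ≥ 0); the in-range indexings
-- terme[valeur] etc. are ported as .getD (exact, since every index produced by the range is in bounds).
def reducer2 (docId : String) (termeInfo : List (String × Int × Int)) : List ((String × String × Int) × (Int × Int)) :=
  let st := termeInfo.foldl
    (fun (st : Int × List Int × List String × List Int) valeur =>
      (st.1 + valeur.2.1, st.2.1 ++ [valeur.2.1], st.2.2.1 ++ [valeur.1], st.2.2.2 ++ [valeur.2.2]))
    (0, [], [], [])
  let total := st.1
  let n := st.2.1
  let terme := st.2.2.1
  let D := st.2.2.2
  let N := List.replicate terme.length total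
  (List.range terme.length).map (fun valeur =>
    ((terme.getD valeur "", docId, D.getD valeur 0), (n.getD valeur 0, N.getD valeur 0)))

-- ===== PORT B =====
-- Source B's agg: divide-and-conquer tree reduction; seg[:mid] / seg[mid:] with 0 ≤ mid ≤ len
-- are exactly List.take / List.drop.
def reducer2Agg (docId : String) (seg : List (String × Int × Int)) : Int × List ((String × String × Int) × Int) :=
  match seg with
  | [] => (0, [])
  | [v] => (v.2.1, [((v.1, docId, v.2.2), v.2.1)])
  | a :: b :: rest =>
    let s := a :: b :: rest
    let mid := s.length / 2
    let l := reducer2Agg docId (s.take mid)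
    let r := reducer2Agg docId (s.drop mid)
    (l.1 + r.1, l.2 ++ r.2)
termination_by seg.length
decreasing_by
  · simp [List.length_take]; omega
  · simp; omega

def reducer2_alt (docId : String) (termeInfo : List (String × Int × Int)) : List ((String × String × Int) × (Int × Int)) :=
  let items := termeInfo
  let tr := reducer2Agg docId items
  tr.2.map (fun row => (row.1, (row.2, tr.1)))

-- ===== PRECONDITION & SPEC =====
def Spec_reducer2 (docId : String) (termeInfo : List (String × Int × Int)) (out : List ((String × String × Int) × (Int × Int))) : Prop := out = reducer2_alt docId termeInfo
instance (docId : String) (termeInfo : List (String × Int × Int)) (out : List ((String × String × Int) × (Int × Int))) : Decidable (Spec_reducer2 docId termeInfo out) := by unfold Spec_reducer2; infer_instance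

-- ===== CLAIM (what is proved, stated in full; the proofs are below) =====
def Claim_equal_reducer2 : Prop := ∀ (docId : String) (termeInfo : List (String × Int × Int)), Dom_reducer2 docId termeInfo → Spec_reducer2 docId termeInfo (reducer2 docId termeInfo)

-- ===== LEMMAS AND PROOFS =====

-- A's accumulating loop builds exactly the running sum and the three projection lists.
theorem reducer2_fold_spec (l : List (String × Int × Int)) (t : Int) (a : List Int) (b : List String) (c : List Int) :
    l.foldl (fun (st : Int × List Int × List String × List Int) valeur =>
      (st.1 + valeur.2.1, st.2.1 ++ [valeur.2.1], st.2.2.1 ++ [valeur.1], st.2.2.2 ++ [valeur.2.2]))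
      (t, a, b, c)
    = (t + (l.map (fun v => v.2.1)).sum,
       a ++ l.map (fun v => v.2.1),
       b ++ l.map (fun v => v.1),
       c ++ l.map (fun v => v.2.2)) := by
  induction l generalizing t a b c with
  | nil => simp
  | cons x xs ih =>
    simp [List.foldl_cons, ih, List.append_assoc]
    ring

-- A's index-replay over the projection lists re-reads each tuple in order.
theorem reducer2_replay_spec (docId : String) (total : Int) (l : List (String × Int × Int)) :
    (List.range l.length).map (fun i =>
      (((l.map (fun v => v.1)).getD i "", docId, (l.map (fun v => v.2.2)).getD i 0),
       ((l.map (fun v => v.2.1)).getD i 0, (List.replicate l.length total).getD i 0)))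
    = l.map (fun v => ((v.1, docId, v.2.2), (v.2.1, total))) := by
  induction l with
  | nil => simp
  | cons x xs ih =>
    simp [List.range_succ_eq_map, List.map_map, Function.comp_def, List.getElem?_replicate] at ih ⊢
    exact ih

-- B's tree reduction computes the count sum and the in-order (key, count) rows.
theorem reducer2Agg_spec (docId : String) (seg : List (String × Int × Int)) :
    reducer2Agg docId seg
      = ((seg.map (fun v => v.2.1)).sum,
         seg.map (fun v => ((v.1, docId, v.2.2), v.2.1))) := by
  fun_induction reducer2Agg docId seg with
  | case1 => simp
  | case2 v => simp
  | case3 a b rest s mid l r ih2 ih1 =>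
    simp only [s, mid, l, r] at ih2 ih1 ⊢
    simp only [ih2, ih1]
    have h : (a :: b :: rest).take ((a :: b :: rest).length / 2)
        ++ (a :: b :: rest).drop ((a :: b :: rest).length / 2) = a :: b :: rest :=
      List.take_append_drop _ _
    conv_rhs => rw [← h]
    simp

-- ===== VERDICT (by name: the statement is the Claim_ definition above) =====
theorem reducer2_spec : Claim_equal_reducer2 := by
  intro docId termeInfo _
  unfold Spec_reducer2 reducer2 reducer2_alt
  simp only [reducer2_fold_spec, reducer2Agg_spec, List.nil_append, List.length_map, zero_add,
    List.map_map, Function.comp_def]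
  exact reducer2_replay_spec docId _ termeInfo
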